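-- pv_equiv track=rewrite | github.com/the-shivers/advent_of_code | 2024/day14/solution.py | score_grid
-- ===== SOURCE A (Python) =====
-- def score_grid(grid, w, h):
--     # Geometry Quadrants: I in top right, II in top left, III. bottom left, IV bottom right
--     q1 = q2 = q3 = q4 = 0
--     for y, line in enumerate(grid):
--         for x, num in enumerate(line):
--             if x < w // 2:
--                 if y < h // 2:
--                     q2 += num
--                 elif y > h // 2:
--                     q3 += num
--             elif x > w // 2:
--                 if y < h // 2:
--                     q1 += num
--                 elif y > h // 2:
--                     q4 += num
--     return q1 * q2 * q3 * q4
-- ===== SOURCE B (Python) =====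
-- def score_grid(grid, w, h):
--     # Summed-area table: build 2D prefix sums once, then read each quadrant
--     # off the table with four O(1) inclusion-exclusion rectangle queries.
--     W = max(map(len, grid), default=0)
--     H = len(grid)
--     P = [[0] * (W + 1)]
--     for row in grid:
--         prev = P[-1]
--         cur = [0]
--         acc = 0
--         for j in range(W):
--             acc += row[j] if j < len(row) else 0
--             cur.append(acc + prev[j + 1])
--         P.append(cur)
--
--     def cc(c):
--         return min(max(c, 0), W)
--
--     def cr(r):
--         return min(max(r, 0), H)
--
--     def rect(r1, r2, c1, c2):
--         return P[r2][c2] - P[r1][c2] - P[r2][c1] + P[r1][c1]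
--
--     mx, my = w // 2, h // 2
--     q2 = rect(0, cr(my), 0, cc(mx))
--     q1 = rect(0, cr(my), cc(mx + 1), W)
--     q3 = rect(cr(my + 1), H, 0, cc(mx))
--     q4 = rect(cr(my + 1), H, cc(mx + 1), W)
--     return q1 * q2 * q3 * q4
-- ===== Notes on version B (the rewrite author's own statement) =====
-- stated objective: alternative
-- what changed: B builds a summed-area table (2D prefix sums) in one pass and then reads each quadrant off the table with an O(1) inclusion-exclusion rectangle query, instead of A's per-cell quadrant branching; equivalence holds for all inputs including negative w/h, where both return 0.
import Mathlib
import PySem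

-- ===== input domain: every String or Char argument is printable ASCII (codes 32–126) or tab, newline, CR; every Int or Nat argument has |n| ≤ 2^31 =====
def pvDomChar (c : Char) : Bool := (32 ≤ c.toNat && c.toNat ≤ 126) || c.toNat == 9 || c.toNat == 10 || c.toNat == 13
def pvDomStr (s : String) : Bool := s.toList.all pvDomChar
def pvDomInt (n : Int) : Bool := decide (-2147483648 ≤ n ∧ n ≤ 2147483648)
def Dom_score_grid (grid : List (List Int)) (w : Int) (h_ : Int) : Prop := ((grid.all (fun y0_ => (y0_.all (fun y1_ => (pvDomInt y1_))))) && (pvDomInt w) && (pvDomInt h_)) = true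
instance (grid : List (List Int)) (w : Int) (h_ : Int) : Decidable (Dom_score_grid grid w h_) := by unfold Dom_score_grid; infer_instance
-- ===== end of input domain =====

-- B builds a summed-area table (2D prefix sums) once and reads each quadrant off it with
-- four inclusion-exclusion rectangle queries, instead of A's per-cell quadrant branching.

-- ===== PORT A =====
def score_grid (grid : List (List Int)) (w : Int) (h_ : Int) : Int :=
  let z := (PySem.List.enumerate grid 0).foldl (fun (q : Int × Int × Int × Int) yl =>
    (PySem.List.enumerate yl.2 0).foldl (fun (q : Int × Int × Int × Int) xn =>
      if xn.1 < PySem.Int.floordiv w 2 then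
        (if yl.1 < PySem.Int.floordiv h_ 2 then (q.1, q.2.1 + xn.2, q.2.2.1, q.2.2.2)
         else if yl.1 > PySem.Int.floordiv h_ 2 then (q.1, q.2.1, q.2.2.1 + xn.2, q.2.2.2)
         else q)
      else if xn.1 > PySem.Int.floordiv w 2 then
        (if yl.1 < PySem.Int.floordiv h_ 2 then (q.1 + xn.2, q.2.1, q.2.2.1, q.2.2.2)
         else if yl.1 > PySem.Int.floordiv h_ 2 then (q.1, q.2.1, q.2.2.1, q.2.2.2 + xn.2)
         else q)
      else q) q) (0, 0, 0, 0)
  z.1 * z.2.1 * z.2.2.1 * z.2.2.2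

-- ===== PORT B =====
-- Transliteration of Source B: `max(map(len, grid), default=0)` as a fold; the table rows are
-- built exactly as Python appends them (`row[j] if j < len(row) else 0` is `row.getD j 0`);
-- all table indices are in range by construction, so `getD _ 0` is exact for Python indexing.
def score_grid_alt (grid : List (List Int)) (w : Int) (h_ : Int) : Int :=
  let W : Nat := grid.foldl (fun m row => max m row.length) 0
  let H : Nat := grid.length
  let P : List (List Int) := grid.foldl (fun P row =>
      let prev := P.getLastD []
      let cur := ((List.range W).foldl (fun (st : List Int × Int) j =>
          let acc := st.2 + row.getD j 0
          (st.1 ++ [acc + prev.getD (j+1) 0], acc)) ([0], 0)).1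
      P ++ [cur]) [List.replicate (W+1) 0]
  let mx := PySem.Int.floordiv w 2
  let my := PySem.Int.floordiv h_ 2
  let cc := fun (c : Int) => (min (max c 0) (W : Int)).toNat
  let cr := fun (r : Int) => (min (max r 0) (H : Int)).toNat
  let rect := fun (r1 r2 c1 c2 : Nat) =>
    (P.getD r2 []).getD c2 0 - (P.getD r1 []).getD c2 0
      - (P.getD r2 []).getD c1 0 + (P.getD r1 []).getD c1 0
  let q2 := rect 0 (cr my) 0 (cc mx)
  let q1 := rect 0 (cr my) (cc (mx+1)) W
  let q3 := rect (cr (my+1)) H 0 (cc mx)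
  let q4 := rect (cr (my+1)) H (cc (mx+1)) W
  q1 * q2 * q3 * q4

-- ===== PRECONDITION & SPEC =====
def Spec_score_grid (grid : List (List Int)) (w : Int) (h_ : Int) (out : Int) : Prop := out = score_grid_alt grid w h_
instance (grid : List (List Int)) (w : Int) (h_ : Int) (out : Int) : Decidable (Spec_score_grid grid w h_ out) := by unfold Spec_score_grid; infer_instance

-- ===== CLAIM (what is proved, stated in full; the proofs are below) =====
def Claim_equal_score_grid : Prop := ∀ (grid : List (List Int)) (w : Int) (h_ : Int), Dom_score_grid grid w h_ → Spec_score_grid grid w h_ (score_grid grid w h_)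

-- ===== LEMMAS AND PROOFS =====

-- A's inner lambda, named so the lemmas below can speak about it (definitional with score_grid's body)
def innerF (mx my y : Int) (q : Int × Int × Int × Int) (xn : Int × Int) : Int × Int × Int × Int :=
  if xn.1 < mx then
    (if y < my then (q.1, q.2.1 + xn.2, q.2.2.1, q.2.2.2)
     else if y > my then (q.1, q.2.1, q.2.2.1 + xn.2, q.2.2.2)
     else q)
  else if xn.1 > mx then
    (if y < my then (q.1 + xn.2, q.2.1, q.2.2.1, q.2.2.2)
     else if y > my then (q.1, q.2.1, q.2.2.1, q.2.2.2 + xn.2)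
     else q)
  else q

lemma inner_lt (mx my y : Int) (hy : y < my) (row : List Int) : ∀ (s : Int) (q : Int × Int × Int × Int),
    (PySem.List.enumerate row s).foldl (innerF mx my y) q
      = (q.1 + (row.drop (mx - s + 1).toNat).sum, q.2.1 + (row.take (mx - s).toNat).sum, q.2.2.1, q.2.2.2) := by
  induction row with
  | nil => intro s q; simp [PySem.List.enumerate]
  | cons a row ih =>
    intro s q
    rw [PySem.List.enumerate_cons, List.foldl_cons]
    rcases lt_trichotomy s mx with h | h | h
    · have ht : (mx - s).toNat = (mx - (s+1)).toNat + 1 := by omega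
      have hd : (mx - s + 1).toNat = (mx - (s+1) + 1).toNat + 1 := by omega
      have hred : innerF mx my y q (s, a) = (q.1, q.2.1 + a, q.2.2.1, q.2.2.2) := by
        simp [innerF, h, hy]
      rw [hred, ih (s+1), ht, hd]
      simp only [List.take_succ_cons, List.drop_succ_cons, List.sum_cons, Prod.mk.injEq]
      and_intros <;> (first | trivial | ring)
    · subst h
      have hd : (s - s + 1).toNat = 1 := by omega
      have ht : (s - s).toNat = 0 := by omega
      have hd' : (s - (s+1) + 1).toNat = 0 := by omega
      have ht' : (s - (s+1)).toNat = 0 := by omega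
      have hred : innerF s my y q (s, a) = q := by simp [innerF]
      rw [hred, ih (s+1), ht, hd, hd', ht']
      simp
    · have hd : (mx - s + 1).toNat = 0 := by omega
      have ht : (mx - s).toNat = 0 := by omega
      have hd' : (mx - (s+1) + 1).toNat = 0 := by omega
      have ht' : (mx - (s+1)).toNat = 0 := by omega
      have hred : innerF mx my y q (s, a) = (q.1 + a, q.2.1, q.2.2.1, q.2.2.2) := by
        simp [innerF, h, hy, not_lt_of_gt h]
      rw [hred, ih (s+1), ht, hd, hd', ht']
      simp only [List.take_zero, List.drop_zero, List.sum_cons, List.sum_nil, Prod.mk.injEq]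
      and_intros <;> (first | trivial | ring)

lemma inner_gt (mx my y : Int) (hy : my < y) (row : List Int) : ∀ (s : Int) (q : Int × Int × Int × Int),
    (PySem.List.enumerate row s).foldl (innerF mx my y) q
      = (q.1, q.2.1, q.2.2.1 + (row.take (mx - s).toNat).sum, q.2.2.2 + (row.drop (mx - s + 1).toNat).sum) := by
  induction row with
  | nil => intro s q; simp [PySem.List.enumerate]
  | cons a row ih =>
    intro s q
    rw [PySem.List.enumerate_cons, List.foldl_cons]
    have hny : ¬ y < my := by omega
    rcases lt_trichotomy s mx with h | h | h
    · have ht : (mx - s).toNat = (mx - (s+1)).toNat + 1 := by omega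
      have hd : (mx - s + 1).toNat = (mx - (s+1) + 1).toNat + 1 := by omega
      have hred : innerF mx my y q (s, a) = (q.1, q.2.1, q.2.2.1 + a, q.2.2.2) := by
        simp [innerF, h, hny, hy]
      rw [hred, ih (s+1), ht, hd]
      simp only [List.take_succ_cons, List.drop_succ_cons, List.sum_cons, Prod.mk.injEq]
      and_intros <;> (first | trivial | ring)
    · subst h
      have hd : (s - s + 1).toNat = 1 := by omega
      have ht : (s - s).toNat = 0 := by omega
      have hd' : (s - (s+1) + 1).toNat = 0 := by omega
      have ht' : (s - (s+1)).toNat = 0 := by omega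
      have hred : innerF s my y q (s, a) = q := by simp [innerF]
      rw [hred, ih (s+1), ht, hd, hd', ht']
      simp
    · have hd : (mx - s + 1).toNat = 0 := by omega
      have ht : (mx - s).toNat = 0 := by omega
      have hd' : (mx - (s+1) + 1).toNat = 0 := by omega
      have ht' : (mx - (s+1)).toNat = 0 := by omega
      have hred : innerF mx my y q (s, a) = (q.1, q.2.1, q.2.2.1, q.2.2.2 + a) := by
        simp [innerF, h, hny, hy, not_lt_of_gt h]
      rw [hred, ih (s+1), ht, hd, hd', ht']
      simp only [List.take_zero, List.drop_zero, List.sum_cons, List.sum_nil, Prod.mk.injEq]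
      and_intros <;> (first | trivial | ring)

lemma inner_eq (mx my y : Int) (hy : y = my) (row : List Int) : ∀ (s : Int) (q : Int × Int × Int × Int),
    (PySem.List.enumerate row s).foldl (innerF mx my y) q = q := by
  induction row with
  | nil => intro s q; simp [PySem.List.enumerate]
  | cons a row ih =>
    intro s q
    rw [PySem.List.enumerate_cons, List.foldl_cons]
    have h1 : ¬ y < my := by omega
    have h2 : ¬ y > my := by omega
    have hred : innerF mx my y q (s, a) = q := by simp [innerF, h1, h2]
    rw [hred, ih (s+1)]

lemma outer_split (mx my : Int) (grid : List (List Int)) : ∀ (s : Int) (q : Int × Int × Int × Int),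
    (PySem.List.enumerate grid s).foldl
        (fun q yl => (PySem.List.enumerate yl.2 0).foldl (innerF mx my yl.1) q) q
      = (q.1 + ((grid.take (my - s).toNat).map (fun row => (row.drop (mx + 1).toNat).sum)).sum,
         q.2.1 + ((grid.take (my - s).toNat).map (fun row => (row.take mx.toNat).sum)).sum,
         q.2.2.1 + ((grid.drop (my - s + 1).toNat).map (fun row => (row.take mx.toNat).sum)).sum,
         q.2.2.2 + ((grid.drop (my - s + 1).toNat).map (fun row => (row.drop (mx + 1).toNat).sum)).sum) := by
  induction grid with
  | nil => intro s q; simp [PySem.List.enumerate]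
  | cons row grid ih =>
    intro s q
    rw [PySem.List.enumerate_cons, List.foldl_cons]
    rcases lt_trichotomy s my with h | h | h
    · have ht : (my - s).toNat = (my - (s+1)).toNat + 1 := by omega
      have hd : (my - s + 1).toNat = (my - (s+1) + 1).toNat + 1 := by omega
      have hstep := inner_lt mx my s h row 0 q
      simp only [sub_zero] at hstep
      rw [hstep, ih (s+1), ht, hd]
      simp only [List.take_succ_cons, List.drop_succ_cons, List.map_cons, List.sum_cons,
        Prod.mk.injEq]
      and_intros <;> (first | trivial | ring)
    · subst h
      have ht : (s - s).toNat = 0 := by omega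
      have hd : (s - s + 1).toNat = 1 := by omega
      have ht' : (s - (s+1)).toNat = 0 := by omega
      have hd' : (s - (s+1) + 1).toNat = 0 := by omega
      rw [inner_eq mx s s rfl row 0 q, ih (s+1), ht, hd, ht', hd']
      simp
    · have ht : (my - s).toNat = 0 := by omega
      have hd : (my - s + 1).toNat = 0 := by omega
      have ht' : (my - (s+1)).toNat = 0 := by omega
      have hd' : (my - (s+1) + 1).toNat = 0 := by omega
      have hstep := inner_gt mx my s h row 0 q
      simp only [sub_zero] at hstep
      rw [hstep, ih (s+1), ht, hd, ht', hd']
      simp only [List.take_zero, List.drop_zero, List.map_nil, List.sum_nil, List.map_cons,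
        List.sum_cons, add_zero, Prod.mk.injEq]
      and_intros <;> (first | trivial | ring)

-- ---- B-side machinery: the summed-area table computes column-prefix sums ----

-- quadrant sum abbreviation: sum of the first j entries of every row of gs
def S (gs : List (List Int)) (j : Nat) : Int := (gs.map (fun r => (r.take j).sum)).sum

def tableRow (W : Nat) (gs : List (List Int)) : List Int :=
  (List.range (W+1)).map (fun j => S gs j)

lemma S_nil (j : Nat) : S [] j = 0 := rfl

lemma S_zero (gs : List (List Int)) : S gs 0 = 0 := by
  simp [S]

lemma S_append (a b : List (List Int)) (j : Nat) : S (a ++ b) j = S a j + S b j := by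
  simp [S]

lemma getD_map_range {f : Nat → Int} {n i : Nat} (d : Int) (h : i < n) :
    (((List.range n).map f).getD i d) = f i := by
  rw [List.getD_eq_getElem?_getD]
  simp [h]

lemma take_succ_sum (l : List Int) (n : Nat) :
    (l.take (n+1)).sum = (l.take n).sum + l.getD n 0 := by
  rw [List.take_add_one, List.sum_append, List.getD_eq_getElem?_getD]
  cases h : l[n]? <;> simp_all

lemma inner_fold (row prev : List Int) : ∀ (k : Nat),
    ((List.range k).foldl (fun (st : List Int × Int) j =>
        (st.1 ++ [(st.2 + row.getD j 0) + prev.getD (j+1) 0], st.2 + row.getD j 0)) ([0], 0))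
      = ([0] ++ (List.range k).map (fun j => (row.take (j+1)).sum + prev.getD (j+1) 0),
         (row.take k).sum) := by
  intro k
  induction k with
  | zero => simp
  | succ k ih =>
    rw [List.range_succ, List.foldl_append, ih, List.map_append]
    simp [take_succ_sum row k, List.foldl_cons]

lemma prev_getD (W : Nat) (gs : List (List Int)) (j : Nat) (hj : j < W+1) :
    (tableRow W gs).getD j 0 = S gs j := by
  rw [tableRow, getD_map_range 0 hj]

lemma cur_eq (W : Nat) (gs : List (List Int)) (row : List Int) (_hrow : row.length ≤ W) :
    ((List.range W).foldl (fun (st : List Int × Int) j =>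
        (st.1 ++ [(st.2 + row.getD j 0) + (tableRow W gs).getD (j+1) 0], st.2 + row.getD j 0)) ([0], 0)).1
      = tableRow W (gs ++ [row]) := by
  rw [inner_fold row (tableRow W gs) W]
  show [0] ++ _ = _
  have hL : ((List.range W).map (fun j => (row.take (j+1)).sum + (tableRow W gs).getD (j+1) 0))
      = (List.range W).map (fun j => (row.take (j+1)).sum + S gs (j+1)) := by
    apply List.map_congr_left
    intro j hj
    rw [List.mem_range] at hj
    rw [prev_getD W gs (j+1) (by omega)]
  rw [hL, tableRow, List.range_succ_eq_map, List.map_cons, List.map_map, List.singleton_append]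
  simp only [List.cons.injEq]
  constructor
  · exact (S_zero _).symm
  · apply List.map_congr_left
    intro j hj
    simp only [Function.comp_apply]
    rw [S_append]
    simp only [S, List.map_cons, List.map_nil, List.sum_cons, List.sum_nil]
    ring

lemma P_build (W : Nat) : ∀ (rest : List (List Int)) (gs : List (List Int)) (acc : List (List Int)),
    acc.getLastD [] = tableRow W gs →
    (∀ r ∈ rest, r.length ≤ W) →
    rest.foldl (fun P row =>
        P ++ [((List.range W).foldl (fun (st : List Int × Int) j =>
            (st.1 ++ [(st.2 + row.getD j 0) + (P.getLastD []).getD (j+1) 0], st.2 + row.getD j 0)) ([0], 0)).1]) acc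
      = acc ++ (List.range rest.length).map (fun i => tableRow W (gs ++ rest.take (i+1))) := by
  intro rest
  induction rest with
  | nil => intro gs acc _ _; simp
  | cons row rest ih =>
    intro gs acc hlast hlen
    rw [List.foldl_cons, hlast, cur_eq W gs row (hlen row (by simp))]
    rw [ih (gs ++ [row]) (acc ++ [tableRow W (gs ++ [row])])
        (by simp) (fun r hr => hlen r (by simp [hr]))]
    rw [List.append_assoc]
    congr 1
    rw [List.length_cons, List.range_succ_eq_map, List.map_cons, List.map_map, List.singleton_append]
    simp only [List.cons.injEq]
    constructor
    · simp
    · apply List.map_congr_left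
      intro i _
      simp [Function.comp, List.append_assoc]

lemma replicate_tableRow (W : Nat) : List.replicate (W+1) (0:Int) = tableRow W [] := by
  symm
  rw [List.eq_replicate_iff]
  constructor
  · simp [tableRow]
  · intro b hb
    rw [tableRow, List.mem_map] at hb
    obtain ⟨j, _, hj⟩ := hb
    rw [← hj, S_nil]

lemma P_entry (grid : List (List Int)) (W : Nat)
    (hW : ∀ r ∈ grid, r.length ≤ W) (i j : Nat) (hi : i ≤ grid.length) (hj : j ≤ W) :
    ((grid.foldl (fun P row =>
        P ++ [((List.range W).foldl (fun (st : List Int × Int) j =>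
            (st.1 ++ [(st.2 + row.getD j 0) + (P.getLastD []).getD (j+1) 0], st.2 + row.getD j 0)) ([0], 0)).1])
        [List.replicate (W+1) 0]).getD i []).getD j 0
      = S (grid.take i) j := by
  rw [P_build W grid [] [List.replicate (W+1) 0] (by simp [replicate_tableRow]) hW]
  have hP : [List.replicate (W+1) (0:Int)] ++ (List.range grid.length).map (fun i => tableRow W ([] ++ grid.take (i+1)))
      = (List.range (grid.length + 1)).map (fun i => tableRow W (grid.take i)) := by
    rw [List.range_succ_eq_map, List.map_cons, List.map_map]
    simp [replicate_tableRow, Function.comp]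
  rw [hP]
  have h1 : ((List.range (grid.length + 1)).map (fun i => tableRow W (grid.take i))).getD i []
      = tableRow W (grid.take i) := by
    rw [List.getD_eq_getElem?_getD]
    simp [Nat.lt_succ_of_le hi]
  rw [h1, tableRow, getD_map_range 0 (by omega)]

lemma le_foldl_max (l : List (List Int)) : ∀ (m : Nat), m ≤ l.foldl (fun m row => max m row.length) m := by
  induction l with
  | nil => intro m; simp
  | cons a l ih =>
    intro m
    rw [List.foldl_cons]
    exact le_trans (le_max_left m a.length) (ih _)

lemma mem_le_foldl_max (l : List (List Int)) (row : List Int) (h : row ∈ l) :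
    ∀ (m : Nat), row.length ≤ l.foldl (fun m row => max m row.length) m := by
  induction l with
  | nil => cases h
  | cons a l ih =>
    intro m
    rw [List.foldl_cons]
    rcases List.mem_cons.mp h with h1 | h1
    · subst h1; exact le_trans (le_max_right m row.length) (le_foldl_max l _)
    · exact ih h1 (max m a.length)

lemma S_clamp (gs : List (List Int)) (W m : Nat) (hW : ∀ r ∈ gs, r.length ≤ W) :
    S gs (min m W) = S gs m := by
  unfold S
  congr 1
  apply List.map_congr_left
  intro r hr
  have := hW r hr
  congr 1
  rw [List.take_eq_take_iff]
  omega

lemma S_sub_drop (gs : List (List Int)) (W c : Nat) (hW : ∀ r ∈ gs, r.length ≤ W) :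
    S gs W - S gs c = (gs.map (fun r => (r.drop c).sum)).sum := by
  induction gs with
  | nil => simp [S]
  | cons r gs ih =>
    have hr : r.length ≤ W := hW r (by simp)
    have h1 : (r.take W) = r := List.take_of_length_le hr
    have h2 : (r.take c).sum + (r.drop c).sum = r.sum := by
      rw [← List.sum_append, List.take_append_drop]
    have ih' := ih (fun x hx => hW x (by simp [hx]))
    simp only [S, List.map_cons, List.sum_cons] at ih' ⊢
    rw [h1]
    linarith

lemma take_min_len (gs : List (List Int)) (a : Nat) : gs.take (min a gs.length) = gs.take a := by
  rw [List.take_eq_take_iff]; omega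

lemma S_drop (gs : List (List Int)) (k j : Nat) : S gs j - S (gs.take k) j = S (gs.drop k) j := by
  have h := S_append (gs.take k) (gs.drop k) j
  rw [List.take_append_drop] at h
  linarith

lemma clampNat (a : Int) (n : Nat) : (min (max a 0) (n:Int)).toNat = min a.toNat n := by
  omega

-- ===== VERDICT (by name: the statement is the Claim_ definition above) =====
theorem score_grid_spec : Claim_equal_score_grid := by
  intro grid w h_ _
  unfold Spec_score_grid
  set mx := PySem.Int.floordiv w 2 with hmxdef
  set my := PySem.Int.floordiv h_ 2 with hmydef
  have hA : score_grid grid w h_ =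
      (let z := (PySem.List.enumerate grid 0).foldl
          (fun q yl => (PySem.List.enumerate yl.2 0).foldl (innerF mx my yl.1) q)
          ((0:Int), (0:Int), (0:Int), (0:Int))
       z.1 * z.2.1 * z.2.2.1 * z.2.2.2) := rfl
  rw [hA, outer_split mx my grid 0 ((0:Int), (0:Int), (0:Int), (0:Int))]
  set W : Nat := grid.foldl (fun m row => max m row.length) 0 with hWdef
  have hW : ∀ r ∈ grid, r.length ≤ W := fun r hr => mem_le_foldl_max grid r hr 0
  set H : Nat := grid.length with hHdef
  simp only [score_grid_alt, ← hmxdef, ← hmydef, ← hWdef, ← hHdef, sub_zero, zero_add]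
  rw [clampNat mx W, clampNat (mx+1) W, clampNat my H, clampNat (my+1) H]
  have hent : ∀ (i j : Nat), i ≤ H → j ≤ W →
      ((grid.foldl (fun P row =>
          P ++ [((List.range W).foldl (fun (st : List Int × Int) j =>
              (st.1 ++ [(st.2 + row.getD j 0) + (P.getLastD []).getD (j+1) 0], st.2 + row.getD j 0)) ([0], 0)).1])
          [List.replicate (W+1) 0]).getD i []).getD j 0 = S (grid.take i) j :=
    fun i j hi hj => P_entry grid W hW i j (hHdef ▸ hi) hj
  rw [hent 0 0 (by omega) (by omega),
      hent 0 W (by omega) (le_refl W),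
      hent 0 (min mx.toNat W) (by omega) (by omega),
      hent 0 (min (mx+1).toNat W) (by omega) (by omega),
      hent H 0 (le_refl H) (by omega),
      hent H W (le_refl H) (le_refl W),
      hent H (min mx.toNat W) (le_refl H) (by omega),
      hent H (min (mx+1).toNat W) (le_refl H) (by omega),
      hent (min my.toNat H) 0 (by omega) (by omega),
      hent (min my.toNat H) W (by omega) (le_refl W),
      hent (min my.toNat H) (min mx.toNat W) (by omega) (by omega),
      hent (min my.toNat H) (min (mx+1).toNat W) (by omega) (by omega),
      hent (min (my+1).toNat H) 0 (by omega) (by omega),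
      hent (min (my+1).toNat H) W (by omega) (le_refl W),
      hent (min (my+1).toNat H) (min mx.toNat W) (by omega) (by omega),
      hent (min (my+1).toNat H) (min (mx+1).toNat W) (by omega) (by omega)]
  have htake0 : grid.take 0 = ([] : List (List Int)) := List.take_zero
  have htakeH : grid.take H = grid := by rw [hHdef]; exact List.take_length
  have htop : grid.take (min my.toNat H) = grid.take my.toNat := by
    rw [hHdef]; exact take_min_len grid my.toNat
  have hbot : grid.take (min (my+1).toNat H) = grid.take (my+1).toNat := by
    rw [hHdef]; exact take_min_len grid (my+1).toNat
  rw [htake0, htakeH, htop, hbot]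
  have hsubtop : ∀ r ∈ grid.take my.toNat, r.length ≤ W :=
    fun r hr => hW r (List.mem_of_mem_take hr)
  have hsubbot : ∀ r ∈ grid.take (my+1).toNat, r.length ≤ W :=
    fun r hr => hW r (List.mem_of_mem_take hr)
  rw [S_clamp _ W mx.toNat hW, S_clamp _ W (mx+1).toNat hW,
      S_clamp _ W mx.toNat hsubtop, S_clamp _ W (mx+1).toNat hsubtop,
      S_clamp _ W mx.toNat hsubbot, S_clamp _ W (mx+1).toNat hsubbot]
  simp only [S_nil, S_zero, sub_zero, add_zero]
  have e1 : S (grid.take my.toNat) W - S (grid.take my.toNat) (mx+1).toNat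
      = ((grid.take my.toNat).map (fun row => (row.drop (mx+1).toNat).sum)).sum :=
    S_sub_drop _ W (mx+1).toNat hsubtop
  have e2 : S (grid.take my.toNat) mx.toNat
      = ((grid.take my.toNat).map (fun row => (row.take mx.toNat).sum)).sum := rfl
  have e3 : S grid mx.toNat - S (grid.take (my+1).toNat) mx.toNat
      = ((grid.drop (my+1).toNat).map (fun row => (row.take mx.toNat).sum)).sum := by
    rw [S_drop]; rfl
  have e4 : S grid W - S (grid.take (my+1).toNat) W - S grid (mx+1).toNat
        + S (grid.take (my+1).toNat) (mx+1).toNat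
      = ((grid.drop (my+1).toNat).map (fun row => (row.drop (mx+1).toNat).sum)).sum := by
    have d1 := S_drop grid (my+1).toNat W
    have d2 := S_drop grid (my+1).toNat (mx+1).toNat
    have d3 := S_sub_drop (grid.drop (my+1).toNat) W (mx+1).toNat
      (fun r hr => hW r (List.mem_of_mem_drop hr))
    linarith
  rw [e1, e2, e3, e4]
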